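-- pv_equiv track=rewrite | github.com/baxt1or/Python_for_DS_and_DA | dictionary.py | get_common_keys
-- ===== SOURCE A (Python) =====
-- def get_common_keys(dict1, dict2):
--     keys = [key for key in dict1.keys()]
--     keys.extend([key for key in dict2.keys()])
--
--     counter = {}
--
--     for key in keys:
--         counter[key] = counter.get(key,0)+1
--
--     result = [key for key, val in counter.items() if val == 2]
--
--     return result
-- ===== SOURCE B (Python) =====
-- def get_common_keys(dict1, dict2):
--     return [key for key in dict1 if key in dict2]
-- ===== Notes on version B (the rewrite author's own statement) =====
-- stated objective: simpler
-- what changed: Replaces A's three-phase multiset decomposition (concatenate both key lists, build an occurrence counter dict, then filter counter items with count==2) by a single comprehension that filters dict1's keys by direct membership in dict2.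
import Mathlib
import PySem

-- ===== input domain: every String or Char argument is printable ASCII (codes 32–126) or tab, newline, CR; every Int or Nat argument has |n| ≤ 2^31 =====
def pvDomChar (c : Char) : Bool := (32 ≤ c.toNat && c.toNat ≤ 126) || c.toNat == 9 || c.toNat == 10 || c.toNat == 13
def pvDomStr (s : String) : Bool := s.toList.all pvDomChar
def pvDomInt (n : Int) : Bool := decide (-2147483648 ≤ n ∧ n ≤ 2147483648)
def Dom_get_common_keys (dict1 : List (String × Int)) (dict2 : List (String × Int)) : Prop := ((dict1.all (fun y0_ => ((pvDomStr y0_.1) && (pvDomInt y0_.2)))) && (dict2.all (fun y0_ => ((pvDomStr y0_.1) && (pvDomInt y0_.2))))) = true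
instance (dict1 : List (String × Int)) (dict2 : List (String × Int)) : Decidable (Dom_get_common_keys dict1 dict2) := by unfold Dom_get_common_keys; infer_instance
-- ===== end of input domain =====

-- B replaces A's concatenate-keys/counter/count==2 decomposition by a one-pass membership
-- filter over dict1's keys; same return value, simpler decomposition (no speed claim).


-- ===== PORT A =====
-- keys = list(dict1.keys()) extended by dict2's keys; counter[key] = counter.get(key,0)+1;
-- result = keys whose count is 2
def get_common_keys (dict1 : List (String × Int)) (dict2 : List (String × Int)) : List String :=
  let keys := (dict1.map (fun kv => kv.1)) ++ (dict2.map (fun kv => kv.1))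
  let counter := keys.foldl (fun d x => d.insert x (d.getD x 0 + 1)) PySem.Dict.empty
  (counter.items.filter (fun kv => kv.2 == (2 : Int))).map (fun kv => kv.1)

-- ===== PORT B =====
-- [key for key in dict1 if key in dict2]
def get_common_keys_alt (dict1 : List (String × Int)) (dict2 : List (String × Int)) : List String :=
  (dict1.map (fun kv => kv.1)).filter (fun k => (dict2.map (fun kv => kv.1)).contains k)

-- ===== PRECONDITION & SPEC =====
-- Pre_ requires each association list to have distinct keys: a Python dict cannot contain a
-- duplicate key, so these lists are exactly the ones representing actual dict arguments.
def Pre_get_common_keys (dict1 : List (String × Int)) (dict2 : List (String × Int)) : Prop :=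
  (dict1.map (fun kv => kv.1)).Nodup ∧ (dict2.map (fun kv => kv.1)).Nodup
instance (dict1 : List (String × Int)) (dict2 : List (String × Int)) : Decidable (Pre_get_common_keys dict1 dict2) := by unfold Pre_get_common_keys; infer_instance

def pvWitness_get_common_keys : (List (String × Int)) × (List (String × Int)) :=
  ([("a", 1), ("b", 2)], [("b", 3), ("c", 4)])

def Spec_get_common_keys (dict1 : List (String × Int)) (dict2 : List (String × Int)) (out : List String) : Prop := out = get_common_keys_alt dict1 dict2
instance (dict1 : List (String × Int)) (dict2 : List (String × Int)) (out : List String) : Decidable (Spec_get_common_keys dict1 dict2 out) := by unfold Spec_get_common_keys; infer_instance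

-- ===== CLAIM (what is proved, stated in full; the proofs are below) =====
def Claim_equal_get_common_keys : Prop := ∀ (dict1 : List (String × Int)) (dict2 : List (String × Int)), Dom_get_common_keys dict1 dict2 → Pre_get_common_keys dict1 dict2 → Spec_get_common_keys dict1 dict2 (get_common_keys dict1 dict2)

-- ===== LEMMAS AND PROOFS =====

-- count in a nodup list is 0/1 by membership
lemma count_nodup {α : Type} [BEq α] [LawfulBEq α] {l : List α} (h : l.Nodup) (a : α) :
    List.count a l = if a ∈ l then 1 else 0 := by
  by_cases hm : a ∈ l
  · simp [hm, List.count_eq_one_of_mem h hm]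
  · simp [hm, List.count_eq_zero_of_not_mem hm]

-- Set.add on literals of membership
lemma set_add_mem {α : Type} [BEq α] [LawfulBEq α] {s : PySem.Set α} {x : α} (h : x ∈ s) :
    PySem.Set.add s x = s := by simp [PySem.Set.add, h]

lemma set_add_not_mem {α : Type} [BEq α] [LawfulBEq α] {s : PySem.Set α} {x : α} (h : x ∉ s) :
    PySem.Set.add s x = s ++ [x] := by simp [PySem.Set.add, h]

-- folding Set.add over a nodup list appends exactly the not-yet-present elements
lemma foldl_add_nodup {α : Type} [BEq α] [LawfulBEq α] (xs : List α) (h : xs.Nodup) :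
    ∀ s : PySem.Set α, List.foldl PySem.Set.add s xs = s ++ xs.filter (fun x => !s.contains x) := by
  induction xs with
  | nil => intro s; simp
  | cons x xs ih =>
    intro s
    have hx : x ∉ xs := (List.nodup_cons.mp h).1
    have hxs : xs.Nodup := (List.nodup_cons.mp h).2
    by_cases hc : x ∈ s
    · rw [List.foldl_cons, set_add_mem hc, ih hxs s]
      simp [hc]
    · rw [List.foldl_cons, set_add_not_mem hc, ih hxs (s ++ [x])]
      have hcongr : xs.filter (fun y => !(s ++ [x]).contains y) = xs.filter (fun y => !s.contains y) := by
        apply List.filter_congr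
        intro y hy
        have hxy : (x == y) = false := by
          by_cases hxy : x = y
          · exact absurd (hxy ▸ hy) hx
          · simp [hxy]
        simp
        intro hyx
        exact absurd (hyx ▸ hy) hx
      rw [hcongr]
      simp [hc]

-- folding Set.add onto s only appends elements not in s
lemma foldl_add_ext {α : Type} [BEq α] [LawfulBEq α] (ys : List α) :
    ∀ s : PySem.Set α, ∃ e : List α, List.foldl PySem.Set.add s ys = s ++ e ∧ ∀ x ∈ e, x ∉ s := by
  induction ys with
  | nil => intro s; exact ⟨[], by simp⟩
  | cons y ys ih =>
    intro s
    by_cases hc : y ∈ s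
    · obtain ⟨e, he, hout⟩ := ih s
      exact ⟨e, by rw [List.foldl_cons, set_add_mem hc]; exact he, hout⟩
    · obtain ⟨e, he, hout⟩ := ih (s ++ [y])
      refine ⟨y :: e, ?_, ?_⟩
      · rw [List.foldl_cons, set_add_not_mem hc]
        simpa using he
      · intro x hx
        rcases List.mem_cons.mp hx with rfl | hx'
        · exact hc
        · intro hmem
          exact (hout x hx') (by simp [hmem])

-- the heart of the equivalence: first occurrences of K1 ++ K2 whose multiset count is 2
-- are exactly the elements of K1 also present in K2, in K1's order
lemma common_keys_core {α : Type} [BEq α] [LawfulBEq α] (K1 K2 : List α)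
    (h1 : K1.Nodup) (h2 : K2.Nodup) :
    (PySem.Set.ofList (K1 ++ K2)).filter (fun k => ((List.count k (K1 ++ K2) : Int) == 2))
      = K1.filter (fun k => K2.contains k) := by
  have h0 : PySem.Set.ofList (K1 ++ K2) = List.foldl PySem.Set.add K1 K2 := by
    rw [PySem.Set.ofList_eq_foldl, List.foldl_append, foldl_add_nodup K1 h1 []]
    simp
  obtain ⟨e, he, hout⟩ := foldl_add_ext K2 K1
  rw [h0, he, List.filter_append]
  have he0 : e.filter (fun k => ((List.count k (K1 ++ K2) : Int) == 2)) = [] := by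
    rw [List.filter_eq_nil_iff]
    intro x hx
    have hn1 : x ∉ K1 := hout x hx
    simp only [List.count_append, count_nodup h1, count_nodup h2, hn1, if_neg, not_false_iff]
    by_cases hx2 : x ∈ K2 <;> simp [hx2]
  have hf1 : K1.filter (fun k => ((List.count k (K1 ++ K2) : Int) == 2))
      = K1.filter (fun k => K2.contains k) := by
    apply List.filter_congr
    intro k hk
    simp only [List.count_append, count_nodup h1, count_nodup h2, hk, if_pos]
    by_cases hk2 : k ∈ K2 <;> simp [hk2]
  rw [he0, hf1, List.append_nil]

-- ===== VERDICT (by name: the statement is the Claim_ definition above) =====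
theorem get_common_keys_spec : Claim_equal_get_common_keys := by
  intro dict1 dict2 _ hpre
  obtain ⟨h1, h2⟩ := hpre
  simp only [Spec_get_common_keys, get_common_keys, get_common_keys_alt]
  rw [PySem.Dict.foldl_insert_getD_add_one_eq_counter, PySem.Dict.items_counter]
  simp only [List.filter_map, List.map_map, Function.comp_def, List.map_id']
  refine (common_keys_core _ _ h1 h2).trans ?_
  rw [List.filter_map]
  rfl
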